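-- pv_equiv track=rewrite | github.com/jnsgdm/python-exercises | algoritmos/LP_ac2/AC2_TP_EX2.py | isTautograma
-- ===== SOURCE A (Python) =====
-- def isTautograma(sentence):
--     trueSentence = sentence.lower()
--     sentenceArr = trueSentence.split(" ")
--     verifyWords = []
--
--     for words in sentenceArr:
--         if words[0] == trueSentence[0]:
--                 verifyWords.append(words)
--
--     if len(sentenceArr) == len(verifyWords):
--         return "Y"
--     else:
--         return "N"
-- ===== SOURCE B (Python) =====
-- def isTautograma(sentence):
--     words = sentence.lower().split(" ")
--     firsts = {w[0] for w in words}
--     return "Y" if len(firsts) == 1 else "N"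
-- ===== Notes on version B (the rewrite author's own statement) =====
-- stated objective: simpler
-- what changed: Instead of collecting the words that match the fixed reference letter trueSentence[0] into a list and comparing list lengths, B builds the set of first letters of all words in one comprehension and answers Y exactly when that set has one element.
import Mathlib
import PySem

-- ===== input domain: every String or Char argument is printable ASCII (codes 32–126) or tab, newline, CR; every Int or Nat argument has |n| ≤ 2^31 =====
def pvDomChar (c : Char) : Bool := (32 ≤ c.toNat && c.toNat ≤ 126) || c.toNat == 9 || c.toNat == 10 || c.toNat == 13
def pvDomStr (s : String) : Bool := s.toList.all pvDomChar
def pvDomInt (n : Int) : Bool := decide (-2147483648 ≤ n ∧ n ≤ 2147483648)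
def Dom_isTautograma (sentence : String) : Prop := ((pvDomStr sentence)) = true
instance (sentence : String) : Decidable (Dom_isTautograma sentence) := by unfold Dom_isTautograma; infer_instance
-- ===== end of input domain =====

-- B replaces A's "collect the words matching the fixed letter trueSentence[0], then compare list
-- lengths" with "build the set of first letters of all words and test whether it has one element"
-- (simpler; same asymptotic cost).

-- ===== PORT A =====
def isTautograma (sentence : String) : String :=
  let trueSentence := PySem.Str.lower sentence
  let sentenceArr := (PySem.Str.split? trueSentence " ").getD []   -- sep ≠ "", so always some
  let verifyWords := sentenceArr.foldl
    (fun acc words =>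
      -- words[0] == trueSentence[0]; pyGet? is none exactly where Python raises IndexError
      -- (empty word / empty sentence) — those inputs are excluded by Pre_.
      if PySem.Str.pyGet? words 0 == PySem.Str.pyGet? trueSentence 0 then acc ++ [words] else acc)
    []
  if sentenceArr.length == verifyWords.length then "Y" else "N"

-- ===== PORT B =====
def isTautograma_alt (sentence : String) : String :=
  let words := (PySem.Str.split? (PySem.Str.lower sentence) " ").getD []
  -- {w[0] for w in words}; pyGet? is none exactly where Python raises (excluded by Pre_)
  let firsts : PySem.Set (Option Char) := PySem.Set.ofList (words.map (fun w => PySem.Str.pyGet? w 0))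
  if PySem.Set.len firsts == 1 then "Y" else "N"

-- ===== PRECONDITION & SPEC =====
-- Pre_ excludes exactly the inputs where the Python A raises IndexError: an empty sentence, or a
-- leading/trailing/doubled separator making some word empty.  B raises on exactly those inputs too.
-- lower() never maps a character to or from the separator, so lowering first changes nothing here.
def Pre_isTautograma (sentence : String) : Prop :=
  ∀ w ∈ (PySem.Str.split? (PySem.Str.lower sentence) " ").getD [], w ≠ ""
instance (sentence : String) : Decidable (Pre_isTautograma sentence) := by
  unfold Pre_isTautograma; infer_instance

def pvWitness_isTautograma : String := "Ana anda aqui"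

def Spec_isTautograma (sentence : String) (out : String) : Prop := out = isTautograma_alt sentence
instance (sentence : String) (out : String) : Decidable (Spec_isTautograma sentence out) := by
  unfold Spec_isTautograma; infer_instance

-- ===== CLAIM (what is proved, stated in full; the proofs are below) =====
def Claim_equal_isTautograma : Prop := ∀ (sentence : String), Dom_isTautograma sentence → Pre_isTautograma sentence → Spec_isTautograma sentence (isTautograma sentence)

-- ===== LEMMAS AND PROOFS =====

-- Shape of split's worker: the result is acc.reverse, then a first piece extending cur.reverse.
lemma splitOn_go_shape (sep : List Char) (fuel : Nat) (l cur : List Char)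
    (acc : List (List Char)) :
    ∃ w t, PySem.Chars.splitOn.go sep fuel l cur acc = acc.reverse ++ (cur.reverse ++ w) :: t := by
  induction fuel generalizing l cur acc with
  | zero => exact ⟨l, [], by simp [PySem.Chars.splitOn.go]⟩
  | succ n ih =>
    cases l with
    | nil => exact ⟨[], [], by simp [PySem.Chars.splitOn.go]⟩
    | cons c rest =>
      by_cases h : sep.isPrefixOf (c :: rest)
      · obtain ⟨w, t, hw⟩ := ih (List.drop sep.length (c :: rest)) [] (cur.reverse :: acc)
        exact ⟨[], w :: t, by simp [PySem.Chars.splitOn.go, h, hw]⟩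
      · obtain ⟨w, t, hw⟩ := ih rest (c :: cur) acc
        exact ⟨c :: w, t, by simp [PySem.Chars.splitOn.go, h, hw]⟩

-- The first piece of a split at ' ' starts with the first character (when that is not ' ').
lemma splitOn_cons_of_ne_space (c : Char) (rest : List Char) (h : c ≠ ' ') :
    ∃ w t, PySem.Chars.splitOn (c :: rest) [' '] = (c :: w) :: t := by
  have hp : ([' '].isPrefixOf (c :: rest)) = false := by
    simp [List.isPrefixOf]; exact fun hc => absurd hc.symm h
  obtain ⟨w, t, hw⟩ := splitOn_go_shape [' '] (rest.length + 1) rest [c] []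
  exact ⟨w, t, by simp [PySem.Chars.splitOn, PySem.Chars.splitOn.go, hp, hw]⟩

-- When the sentence starts with ' ', the first piece is empty.
lemma splitOn_cons_space (rest : List Char) :
    ∃ t, PySem.Chars.splitOn (' ' :: rest) [' '] = [] :: t := by
  obtain ⟨w, t, hw⟩ := splitOn_go_shape [' '] (rest.length + 1) rest [] [[]]
  have step : PySem.Chars.splitOn (' ' :: rest) [' ']
      = PySem.Chars.splitOn.go [' '] (rest.length + 1) rest [] [[]] := rfl
  exact ⟨w :: t, by rw [step, hw]; simp⟩

lemma set_foldl_add_length_ge {α : Type} [BEq α] (l : List α) (s : PySem.Set α) :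
    s.length ≤ (l.foldl PySem.Set.add s).length := by
  induction l generalizing s with
  | nil => simp
  | cons y l ih =>
    refine le_trans ?_ (ih (PySem.Set.add s y))
    simp only [PySem.Set.add]
    split <;> simp

-- set(x :: l) is a singleton iff every element of l equals x.
lemma set_ofList_length_one {α : Type} [BEq α] [LawfulBEq α] (x : α) (l : List α) :
    (PySem.Set.ofList (x :: l)).length = 1 ↔ ∀ y ∈ l, y = x := by
  have main : ∀ (l : List α) (x : α),
      (l.foldl PySem.Set.add [x]).length = 1 ↔ ∀ y ∈ l, y = x := by
    intro l
    induction l with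
    | nil => simp
    | cons y l ih =>
      intro x
      by_cases hyx : y = x
      · subst hyx
        simpa [PySem.Set.add, PySem.Set.contains] using ih y
      · have h2 : 2 ≤ ((l.foldl PySem.Set.add [x, y]).length) := by
          simpa using set_foldl_add_length_ge l [x, y]
        have : (List.foldl PySem.Set.add [x, y] l).length ≠ 1 := by omega
        simp only [List.foldl_cons, PySem.Set.add, PySem.Set.contains]
        have hc : ([x].contains y) = false := by
          simp; exact fun h => hyx h
        simp only [hc]
        simp only [Bool.false_eq_true, if_false]
        constructor
        · intro h1; exact absurd h1 this
        · intro hall; exact absurd (hall y (by simp)) hyx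
  have : PySem.Set.ofList (x :: l) = l.foldl PySem.Set.add [x] := by
    simp [PySem.Set.ofList_eq_foldl, PySem.Set.add, PySem.Set.contains]
  rw [this]; exact main l x

-- ===== VERDICT (by name: the statement is the Claim_ definition above) =====
theorem isTautograma_spec : Claim_equal_isTautograma := by
  intro sentence _ hpre
  unfold Spec_isTautograma isTautograma isTautograma_alt
  unfold Pre_isTautograma at hpre
  have hsep : (" " : String).toList = [' '] := by decide
  have hsplitdef : PySem.Str.split? (PySem.Str.lower sentence) " "
      = some (List.map String.ofList
          (PySem.Chars.splitOn (PySem.Str.lower sentence).toList [' '])) := by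
    simp [PySem.Str.split?, PySem.Chars.split?, hsep]
  rw [hsplitdef] at hpre ⊢
  simp only [Option.getD_some] at hpre ⊢
  obtain ⟨c, rest, w0, t, hlow, hsplit⟩ :
      ∃ c rest w0 t, (PySem.Str.lower sentence).toList = c :: rest ∧
        PySem.Chars.splitOn (PySem.Str.lower sentence).toList [' '] = (c :: w0) :: t := by
    cases hls : (PySem.Str.lower sentence).toList with
    | nil =>
      exfalso
      have h0 : PySem.Chars.splitOn ([] : List Char) [' '] = [[]] := by decide
      rw [hls, h0] at hpre
      exact hpre (String.ofList []) (by simp) (by decide)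
    | cons c rest =>
      by_cases hc : c = ' '
      · exfalso
        subst hc
        obtain ⟨t, ht⟩ := splitOn_cons_space rest
        rw [hls, ht] at hpre
        exact hpre (String.ofList []) (by simp) (by decide)
      · obtain ⟨w0, t, hw⟩ := splitOn_cons_of_ne_space c rest hc
        exact ⟨c, rest, w0, t, rfl, hw⟩
  rw [hsplit]
  -- trueSentence[0] = c
  have hget : PySem.Str.pyGet? (PySem.Str.lower sentence) 0 = some c := by
    simp [PySem.Str.pyGet?, PySem.Chars.pyGet?, hlow, PySem.List.pyGet?, PySem.List.pyIdx?]
  rw [hget]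
  -- A's loop is a filter
  rw [show (fun (acc : List String) (words : String) =>
        if (PySem.Str.pyGet? words 0 == some c) = true then acc ++ [words] else acc) =
      (fun acc words =>
        if (fun w => PySem.Str.pyGet? w 0 == some c) words = true
        then acc ++ [(fun (w : String) => w) words] else acc) from rfl,
    PySem.List.foldl_append_if]
  simp only [List.map_id', List.nil_append]
  simp only [hsplitdef, Option.getD_some, hsplit]
  have hhd : PySem.Str.pyGet? (String.ofList (c :: w0)) 0 = some c := by
    simp [PySem.Str.pyGet?, PySem.Chars.pyGet?, PySem.List.pyGet?, PySem.List.pyIdx?]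
  have hA : ((List.map String.ofList ((c :: w0) :: t)).length =
      (List.filter (fun w => PySem.Str.pyGet? w 0 == some c)
        (List.map String.ofList ((c :: w0) :: t))).length) ↔
      ∀ y ∈ t, PySem.Chars.pyGet? y 0 = some c := by
    rw [eq_comm, List.length_filter_eq_length_iff]
    constructor
    · intro h y hy
      have := h (String.ofList y) (by simp only [List.map_cons, List.mem_cons]; exact Or.inr (List.mem_map.mpr ⟨y, hy, rfl⟩))
      simpa [PySem.Str.pyGet?, PySem.Chars.pyGet?] using this
    · intro h w hw
      simp only [List.map_cons, List.mem_cons, List.mem_map] at hw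
      rcases hw with hw | ⟨y, hy, rfl⟩
      · subst hw; simp
      · simpa [PySem.Str.pyGet?, PySem.Chars.pyGet?] using h y hy
  have hB : ((PySem.Set.ofList (List.map (fun w => PySem.Str.pyGet? w 0)
        (List.map String.ofList ((c :: w0) :: t)))).length = 1) ↔
      ∀ y ∈ t, PySem.Chars.pyGet? y 0 = some c := by
    rw [List.map_map, List.map_cons, Function.comp_apply, hhd, set_ofList_length_one]
    constructor
    · intro h y hy
      have := h (PySem.Str.pyGet? (String.ofList y) 0) (List.mem_map.mpr ⟨y, hy, rfl⟩)
      simpa [PySem.Str.pyGet?, PySem.Chars.pyGet?] using this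
    · intro h z hz
      obtain ⟨y, hy, rfl⟩ := List.mem_map.mp hz
      simpa [PySem.Str.pyGet?, PySem.Chars.pyGet?] using h y hy
  have hcond : (((List.map String.ofList ((c :: w0) :: t)).length ==
      (List.filter (fun w => PySem.Str.pyGet? w 0 == some c)
        (List.map String.ofList ((c :: w0) :: t))).length) : Bool)
      = ((PySem.Set.ofList (List.map (fun w => PySem.Str.pyGet? w 0)
          (List.map String.ofList ((c :: w0) :: t)))).len == 1) := by
    rw [Bool.eq_iff_iff]
    simp only [beq_iff_eq, PySem.Set.len]
    constructor
    · intro h; exact_mod_cast hB.mpr (hA.mp h)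
    · intro h; exact hA.mpr (hB.mp (by exact_mod_cast h))
  rw [hcond]
  rfl
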